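-- pv_equiv track=rewrite | github.com/rafaelob/aiLine | references/Context_Management_Pack_GUIDE/upstream/context_memory_playbook_original/context_memory_playbook/src/contextkit/skills_registry.py | _select_sections
-- ===== SOURCE A (Python) =====
-- def _select_sections(markdown: str, section_titles: list[str]) -> str:
--     """Naive section selector: keeps headings that contain any of the titles (case-insensitive)."""
--     wanted = [t.lower() for t in section_titles]
--     lines = markdown.splitlines()
--     out: list[str] = []
--     keep = True  # keep frontmatter / intro by default
--     for line in lines:
--         if line.strip().startswith("#"):
--             h = line.strip("# ").lower()
--             keep = any(w in h for w in wanted)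
--         if keep:
--             out.append(line)
--     return "\n".join(out).strip()
-- ===== SOURCE B (Python) =====
-- def _select_sections(markdown: str, section_titles: list[str]) -> str:
--     """Two-phase selector: split into (heading, lines) sections, then filter, then join."""
--     wanted = [t.lower() for t in section_titles]
--     sections = []
--     cur_head, cur_lines = None, []
--     for line in markdown.splitlines():
--         if line.strip().startswith("#"):
--             sections.append((cur_head, cur_lines))
--             cur_head, cur_lines = line.strip("# ").lower(), [line]
--         else:
--             cur_lines = cur_lines + [line]
--     sections.append((cur_head, cur_lines))
--     out = [l for h, ls in sections
--            if h is None or any(w in h for w in wanted)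
--            for l in ls]
--     return "\n".join(out).strip()
-- ===== Notes on version B (the rewrite author's own statement) =====
-- stated objective: alternative
-- what changed: B replaces A's single streaming pass with a keep flag by a two-phase decomposition: first group the lines into (heading, lines) sections, then filter the sections (intro always kept) and join the kept lines.
import Mathlib
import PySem

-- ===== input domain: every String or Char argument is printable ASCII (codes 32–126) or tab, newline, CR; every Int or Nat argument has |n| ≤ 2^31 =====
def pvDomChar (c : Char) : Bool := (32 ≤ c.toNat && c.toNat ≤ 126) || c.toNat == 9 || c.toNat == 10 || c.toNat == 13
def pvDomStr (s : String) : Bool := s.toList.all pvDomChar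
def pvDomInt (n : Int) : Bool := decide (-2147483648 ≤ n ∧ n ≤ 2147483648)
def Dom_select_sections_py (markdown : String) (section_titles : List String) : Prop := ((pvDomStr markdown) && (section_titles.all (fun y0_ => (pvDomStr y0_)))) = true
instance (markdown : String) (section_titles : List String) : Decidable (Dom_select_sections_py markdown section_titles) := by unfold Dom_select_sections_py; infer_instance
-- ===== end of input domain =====

-- B splits the markdown into (heading, lines) sections first and filters them in a second
-- pass (objective: alternative decomposition, same cost); A streams with a keep flag.

-- ===== PORT A =====
-- A's loop body: update the keep flag on a heading line, then append the line if kept.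
def aStep (wanted : List String) (st : List String × Bool) (line : String) : List String × Bool :=
  let keep := if PySem.Str.startswith (PySem.Str.strip line) "#" then
      let h := PySem.Str.lower (PySem.Str.stripChars line "# ")
      wanted.any (fun w => PySem.Str.isIn w h)
    else st.2
  (if keep then st.1 ++ [line] else st.1, keep)

def select_sections_py (markdown : String) (section_titles : List String) : String :=
  let wanted := section_titles.map (fun t => PySem.Str.lower t)
  let lines := PySem.Str.splitlines markdown
  let res := lines.foldl (aStep wanted) ([], true)
  PySem.Str.strip (PySem.Str.join "\n" res.1)

-- ===== PORT B =====
-- B's grouping step: on a heading line close the current section and open a new one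
-- (heading already lowered); otherwise append the line to the current section.
def bStep (st : List (Option String × List String) × (Option String × List String))
    (line : String) : List (Option String × List String) × (Option String × List String) :=
  if PySem.Str.startswith (PySem.Str.strip line) "#" then
    (st.1 ++ [st.2], (some (PySem.Str.lower (PySem.Str.stripChars line "# ")), [line]))
  else (st.1, (st.2.1, st.2.2 ++ [line]))

-- B's section filter: keep the intro (headingless) section, and a heading section
-- iff some wanted title occurs in its heading.
def bKeep (wanted : List String) (s : Option String × List String) : Bool :=
  match s.1 with
  | none => true
  | some h => wanted.any (fun w => PySem.Str.isIn w h)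

def select_sections_py_alt (markdown : String) (section_titles : List String) : String :=
  let wanted := section_titles.map (fun t => PySem.Str.lower t)
  let st := (PySem.Str.splitlines markdown).foldl bStep ([], (none, []))
  let sections := st.1 ++ [st.2]
  let out := (sections.filter (bKeep wanted)).flatMap (fun s => s.2)
  PySem.Str.strip (PySem.Str.join "\n" out)

-- ===== PRECONDITION & SPEC =====
def Spec_select_sections_py (markdown : String) (section_titles : List String) (out : String) : Prop := out = select_sections_py_alt markdown section_titles
instance (markdown : String) (section_titles : List String) (out : String) : Decidable (Spec_select_sections_py markdown section_titles out) := by unfold Spec_select_sections_py; infer_instance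

-- ===== CLAIM (what is proved, stated in full; the proofs are below) =====
def Claim_equal_select_sections_py : Prop := ∀ (markdown : String) (section_titles : List String), Dom_select_sections_py markdown section_titles → Spec_select_sections_py markdown section_titles (select_sections_py markdown section_titles)

-- ===== LEMMAS AND PROOFS =====

/-- The lines a list of sections contributes to B's output. -/
def pvSelOf (wanted : List String) (secs : List (Option String × List String)) : List String :=
  (secs.filter (bKeep wanted)).flatMap (fun s => s.2)

/-- The lines one section contributes. -/
def pvSelIf (wanted : List String) (cur : Option String × List String) : List String :=
  if bKeep wanted cur then cur.2 else []

theorem pvSelOf_append_single (wanted : List String)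
    (secs : List (Option String × List String)) (cur : Option String × List String) :
    pvSelOf wanted (secs ++ [cur]) = pvSelOf wanted secs ++ pvSelIf wanted cur := by
  unfold pvSelOf pvSelIf
  rw [List.filter_append, List.flatMap_append]
  cases h : bKeep wanted cur <;> simp [h]

/-- A's streaming fold computes the selection of B's sections at every point. -/
theorem pv_fold_eq (wanted : List String) (lines : List String) :
    ∀ (secs : List (Option String × List String)) (cur : Option String × List String),
    lines.foldl (aStep wanted) (pvSelOf wanted secs ++ pvSelIf wanted cur, bKeep wanted cur)
    = ((fun st : List (Option String × List String) × (Option String × List String) =>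
          (pvSelOf wanted st.1 ++ pvSelIf wanted st.2, bKeep wanted st.2))
        (lines.foldl bStep (secs, cur))) := by
  induction lines with
  | nil => intro secs cur; rfl
  | cons line rest ih =>
    intro secs cur
    rw [List.foldl_cons, List.foldl_cons]
    by_cases hh : PySem.Str.startswith (PySem.Str.strip line) "#" = true
    · have hb : bStep (secs, cur) line
          = (secs ++ [cur], (some (PySem.Str.lower (PySem.Str.stripChars line "# ")), [line])) := by
        unfold bStep; rw [if_pos hh]
      have ha : aStep wanted (pvSelOf wanted secs ++ pvSelIf wanted cur, bKeep wanted cur) line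
          = (pvSelOf wanted (secs ++ [cur])
              ++ pvSelIf wanted (some (PySem.Str.lower (PySem.Str.stripChars line "# ")), [line]),
             bKeep wanted (some (PySem.Str.lower (PySem.Str.stripChars line "# ")), [line])) := by
        simp only [aStep, hh, if_true, pvSelOf_append_single, pvSelIf, bKeep]
        split <;> simp
      rw [hb, ha, ih]
    · have hb : bStep (secs, cur) line = (secs, (cur.1, cur.2 ++ [line])) := by
        unfold bStep; rw [if_neg hh]
      have ha : aStep wanted (pvSelOf wanted secs ++ pvSelIf wanted cur, bKeep wanted cur) line
          = (pvSelOf wanted secs ++ pvSelIf wanted (cur.1, cur.2 ++ [line]),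
             bKeep wanted (cur.1, cur.2 ++ [line])) := by
        have hk : bKeep wanted (cur.1, cur.2 ++ [line]) = bKeep wanted cur := by
          unfold bKeep; rcases cur with ⟨o, ls⟩; cases o <;> rfl
        simp only [aStep, hh, Bool.false_eq_true, if_false, pvSelIf, hk]
        rcases bKeep wanted cur <;> simp
      rw [hb, ha, ih]

-- ===== VERDICT (by name: the statement is the Claim_ definition above) =====
theorem select_sections_py_spec : Claim_equal_select_sections_py := by
  intro markdown section_titles _
  unfold Spec_select_sections_py select_sections_py select_sections_py_alt
  simp only []
  have h0 : (([], true) : List String × Bool)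
      = (pvSelOf (section_titles.map (fun t => PySem.Str.lower t)) []
          ++ pvSelIf (section_titles.map (fun t => PySem.Str.lower t)) ((none, []) : Option String × List String),
         bKeep (section_titles.map (fun t => PySem.Str.lower t)) ((none, []) : Option String × List String)) := rfl
  rw [h0, pv_fold_eq (section_titles.map (fun t => PySem.Str.lower t))
    (PySem.Str.splitlines markdown) [] ((none, []))]
  beta_reduce
  rw [← pvSelOf_append_single]
  rfl
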